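-- pv_equiv track=rewrite | github.com/jmmeus/AoC25 | day_9/part2.py | check_walls_crossed
-- ===== SOURCE A (Python) =====
-- def find_first_greater_than(walls: list[tuple[int, tuple[int, int]]], key_value: int) -> int:
--     """Binary search: find first index where wall's key (first element) > key_value."""
--     left, right = 0, len(walls)
--     while left < right:
--         mid = (left + right) // 2
--         if walls[mid][0] <= key_value:
--             left = mid + 1
--         else:
--             right = mid
--     return left
--
-- def find_first_greater_or_equal(walls: list[tuple[int, tuple[int, int]]], key_value: int) -> int:
--     """Binary search: find first index where wall's key (first element) >= key_value."""
--     left, right = 0, len(walls)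
--     while left < right:
--         mid = (left + right) // 2
--         if walls[mid][0] < key_value:
--             left = mid + 1
--         else:
--             right = mid
--     return left
--
-- def check_walls_crossed(walls: list[tuple[int, tuple[int, int]]], primary_min: int, primary_max: int,
--                         secondary_min: int, secondary_max: int) -> bool:
--     """
--     Check if a rectangle crosses walls improperly.
--
--     For horizontal walls: primary is y, secondary is x
--     For vertical walls: primary is x, secondary is y
--
--     Returns True if rectangle is valid (no improper crossings), False otherwise.
--     """
--     crosses: list[int] = []  # Primary values of crossed walls
--
--     # Use binary search to find range of walls between primary_min and primary_max
--     start_idx = find_first_greater_than(walls, primary_min)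
--     end_idx = find_first_greater_or_equal(walls, primary_max)
--
--     # Only iterate through walls in the relevant range
--     for wall_primary, (wall_sec1, wall_sec2) in walls[start_idx:end_idx]:
--         # Check if wall crosses between secondary bounds
--         if not (wall_sec2 <= secondary_min or wall_sec1 >= secondary_max):
--             crosses.append(wall_primary)
--
--     # Odd number of crosses means we can't be fully inside
--     if len(crosses) % 2 == 1:
--         return False
--
--     # Even number of walls - check if any are separated by more than 1
--     # (meaning there's a wall crossing in between)
--     if len(crosses) > 0:
--         for i in range(len(crosses) - 1):
--             if crosses[i + 1] - crosses[i] > 1: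
--                 return False
--
--     return True
-- ===== SOURCE B (Python) =====
-- def check_walls_crossed(walls: list[tuple[int, tuple[int, int]]], primary_min: int, primary_max: int,
--                         secondary_min: int, secondary_max: int) -> bool:
--     # Single linear pass; no binary search, no crosses list, no second scan.
--     parity = 0
--     prev = None
--     gap_ok = True
--     for wall_primary, (wall_sec1, wall_sec2) in walls:
--         if primary_min < wall_primary < primary_max and wall_sec2 > secondary_min and wall_sec1 < secondary_max:
--             parity ^= 1
--             if prev is not None and wall_primary - prev > 1:
--                 gap_ok = False
--             prev = wall_primary
--     return parity == 0 and gap_ok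
-- ===== Notes on version B (the rewrite author's own statement) =====
-- stated objective: simpler
-- what changed: Replaced the two binary-search helpers, the slice, the crosses list and the second adjacent-gap scan by one linear pass over all walls that keeps only a running parity bit, the previous crossed wall and a gap flag.
-- outside the precondition, e.g. on check_walls_crossed([(1, (0, 1)), (0, (0, 0))], 0, 2, 0, 1): A returns True, B returns False
import Mathlib
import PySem

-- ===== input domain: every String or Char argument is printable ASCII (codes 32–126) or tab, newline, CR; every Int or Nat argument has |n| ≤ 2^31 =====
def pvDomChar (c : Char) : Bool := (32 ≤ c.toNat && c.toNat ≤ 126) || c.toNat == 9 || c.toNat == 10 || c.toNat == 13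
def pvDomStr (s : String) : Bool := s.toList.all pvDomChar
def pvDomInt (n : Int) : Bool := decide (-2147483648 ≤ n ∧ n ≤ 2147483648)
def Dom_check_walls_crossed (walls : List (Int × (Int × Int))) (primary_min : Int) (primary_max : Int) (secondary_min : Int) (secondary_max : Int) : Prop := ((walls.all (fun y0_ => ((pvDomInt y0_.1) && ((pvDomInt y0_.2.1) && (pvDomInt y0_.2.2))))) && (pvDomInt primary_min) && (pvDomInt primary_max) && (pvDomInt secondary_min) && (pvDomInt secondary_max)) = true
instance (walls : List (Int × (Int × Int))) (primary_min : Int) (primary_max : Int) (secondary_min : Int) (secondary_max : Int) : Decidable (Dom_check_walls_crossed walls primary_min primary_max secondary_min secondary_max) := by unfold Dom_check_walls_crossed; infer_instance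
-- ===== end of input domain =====

-- ===== PORT A =====
-- B replaces A's binary searches + slice + crosses list + second gap scan by one linear pass (objective: simpler).

-- Python: find_first_greater_than's while-loop. 0 <= left <= mid < right <= len always holds,
-- so walls[mid] never raises; the `none` branch of the lookup is unreachable.
def pvFFGTgo (walls : List (Int × (Int × Int))) (key : Int) (left right : Nat) : Nat :=
  if _h : left < right then
    match walls[(left + right) / 2]? with
    | some w =>
        if w.1 ≤ key then pvFFGTgo walls key ((left + right) / 2 + 1) right
        else pvFFGTgo walls key left ((left + right) / 2)
    | none => left
  else left
termination_by right - left
decreasing_by all_goals omega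

def find_first_greater_than (walls : List (Int × (Int × Int))) (key_value : Int) : Nat :=
  pvFFGTgo walls key_value 0 walls.length

-- Python: find_first_greater_or_equal's while-loop (same shape, strict comparison).
def pvFFGEgo (walls : List (Int × (Int × Int))) (key : Int) (left right : Nat) : Nat :=
  if _h : left < right then
    match walls[(left + right) / 2]? with
    | some w =>
        if w.1 < key then pvFFGEgo walls key ((left + right) / 2 + 1) right
        else pvFFGEgo walls key left ((left + right) / 2)
    | none => left
  else left
termination_by right - left
decreasing_by all_goals omega

def find_first_greater_or_equal (walls : List (Int × (Int × Int))) (key_value : Int) : Nat :=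
  pvFFGEgo walls key_value 0 walls.length

-- Python: 'for i in range(len(crosses) - 1): if crosses[i+1] - crosses[i] > 1: return False'
def pvGapCheck : List Int → Bool
  | a :: b :: t => if b - a > 1 then false else pvGapCheck (b :: t)
  | _ => true

def check_walls_crossed (walls : List (Int × (Int × Int))) (primary_min : Int) (primary_max : Int) (secondary_min : Int) (secondary_max : Int) : Bool :=
  let start_idx := find_first_greater_than walls primary_min
  let end_idx := find_first_greater_or_equal walls primary_max
  let crosses := (PySem.List.slice walls (some (start_idx : Int)) (some (end_idx : Int))).foldl
      (fun acc w => if !(decide (w.2.2 ≤ secondary_min) || decide (w.2.1 ≥ secondary_max))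
                    then acc ++ [w.1] else acc) ([] : List Int)
  if crosses.length % 2 == 1 then false
  else if decide (crosses.length > 0) then pvGapCheck crosses
  else true

-- ===== PORT B =====
def check_walls_crossed_alt (walls : List (Int × (Int × Int))) (primary_min : Int) (primary_max : Int) (secondary_min : Int) (secondary_max : Int) : Bool :=
  let r := walls.foldl
    (fun (st : Nat × Option Int × Bool) w =>
      if decide (primary_min < w.1) && decide (w.1 < primary_max)
         && decide (w.2.2 > secondary_min) && decide (w.2.1 < secondary_max) then
        ((st.1 + 1) % 2, some w.1,
         st.2.2 && !(match st.2.1 with | none => false | some q => decide (w.1 - q > 1)))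
      else st)
    ((0 : Nat), (none : Option Int), true)
  (r.1 == 0) && r.2.2

-- ===== PRECONDITION & SPEC =====
-- Pre_ excludes walls lists that are NOT sorted ascending by primary key (unless no wall even
-- overlaps the secondary window, where sorting is irrelevant): A's binary searches assume
-- sortedness (the AoC caller builds the list sorted), and on unsorted input the slice they
-- select is an accident of bisection order, a value no one would specify.
def Pre_check_walls_crossed (walls : List (Int × (Int × Int))) (primary_min : Int) (primary_max : Int) (secondary_min : Int) (secondary_max : Int) : Prop :=
  List.Pairwise (fun a b => a.1 ≤ b.1) walls
    ∨ ∀ w ∈ walls, w.2.2 ≤ secondary_min ∨ w.2.1 ≥ secondary_max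
instance (walls : List (Int × (Int × Int))) (primary_min : Int) (primary_max : Int) (secondary_min : Int) (secondary_max : Int) : Decidable (Pre_check_walls_crossed walls primary_min primary_max secondary_min secondary_max) := by unfold Pre_check_walls_crossed; infer_instance

def pvWitness_check_walls_crossed : (List (Int × (Int × Int))) × Int × Int × Int × Int :=
  ([(1, (0, 2)), (3, (0, 2))], 0, 4, 0, 1)

def Spec_check_walls_crossed (walls : List (Int × (Int × Int))) (primary_min : Int) (primary_max : Int) (secondary_min : Int) (secondary_max : Int) (out : Bool) : Prop := out = check_walls_crossed_alt walls primary_min primary_max secondary_min secondary_max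
instance (walls : List (Int × (Int × Int))) (primary_min : Int) (primary_max : Int) (secondary_min : Int) (secondary_max : Int) (out : Bool) : Decidable (Spec_check_walls_crossed walls primary_min primary_max secondary_min secondary_max out) := by unfold Spec_check_walls_crossed; infer_instance

-- ===== CLAIM (what is proved, stated in full; the proofs are below) =====
def Claim_equal_check_walls_crossed : Prop := ∀ (walls : List (Int × (Int × Int))) (primary_min : Int) (primary_max : Int) (secondary_min : Int) (secondary_max : Int), Dom_check_walls_crossed walls primary_min primary_max secondary_min secondary_max → Pre_check_walls_crossed walls primary_min primary_max secondary_min secondary_max → Spec_check_walls_crossed walls primary_min primary_max secondary_min secondary_max (check_walls_crossed walls primary_min primary_max secondary_min secondary_max)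

-- ===== LEMMAS AND PROOFS =====

theorem pvTakeWhile_getElem_false {α : Type} (p : α → Bool) (l : List α)
    (h : (l.takeWhile p).length < l.length) : p (l[(l.takeWhile p).length]'h) = false := by
  induction l with
  | nil => simp at h
  | cons a t ih =>
    by_cases hp : p a
    · simp [hp] at h ⊢
      exact ih (by omega)
    · simp [hp] at h ⊢

-- prefix getElem: element inside takeWhile satisfies p
theorem pvTakeWhile_getElem_true {α : Type} (p : α → Bool) (l : List α) (i : Nat)
    (hl : i < l.length) (h : i < (l.takeWhile p).length) : p (l[i]'hl) = true := by
  induction l generalizing i with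
  | nil => simp at hl
  | cons a t ih =>
    by_cases hp : p a
    · cases i with
      | zero => simpa using hp
      | succ j =>
        simp [hp] at h ⊢
        exact ih j (by simpa using hl) (by omega)
    · simp [hp] at h
theorem pvCharGT (walls : List (Int × (Int × Int))) (key : Int)
    (hs : List.Pairwise (fun a b => a.1 ≤ b.1) walls) (i : Nat) (hi : i < walls.length) :
    ((walls[i]'hi).1 ≤ key ↔ i < (walls.takeWhile (fun w => decide (w.1 ≤ key))).length) := by
  set p : Int × (Int × Int) → Bool := fun w => decide (w.1 ≤ key) with hp
  constructor
  · intro hle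
    by_contra hnot
    push_neg at hnot
    have hc : (walls.takeWhile p).length < walls.length := lt_of_le_of_lt hnot hi
    have hf := pvTakeWhile_getElem_false p walls hc
    have hkey : ¬ (walls[(walls.takeWhile p).length]'hc).1 ≤ key := by
      simpa [hp] using hf
    rcases lt_or_eq_of_le hnot with hlt | heq
    · have := (List.pairwise_iff_getElem.mp hs) _ _ hc hi hlt
      omega
    · subst heq; omega
  · intro hlt
    have := pvTakeWhile_getElem_true p walls i hi hlt
    simpa [hp] using this

theorem pvCharGE (walls : List (Int × (Int × Int))) (key : Int)
    (hs : List.Pairwise (fun a b => a.1 ≤ b.1) walls) (i : Nat) (hi : i < walls.length) :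
    ((walls[i]'hi).1 < key ↔ i < (walls.takeWhile (fun w => decide (w.1 < key))).length) := by
  set p : Int × (Int × Int) → Bool := fun w => decide (w.1 < key) with hp
  constructor
  · intro hle
    by_contra hnot
    push_neg at hnot
    have hc : (walls.takeWhile p).length < walls.length := lt_of_le_of_lt hnot hi
    have hf := pvTakeWhile_getElem_false p walls hc
    have hkey : ¬ (walls[(walls.takeWhile p).length]'hc).1 < key := by
      simpa [hp] using hf
    rcases lt_or_eq_of_le hnot with hlt | heq
    · have := (List.pairwise_iff_getElem.mp hs) _ _ hc hi hlt
      omega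
    · subst heq; omega
  · intro hlt
    have := pvTakeWhile_getElem_true p walls i hi hlt
    simpa [hp] using this

theorem pvGoGT_eq (walls : List (Int × (Int × Int))) (key : Int)
    (c : Nat)
    (hchar : ∀ (i : Nat) (hi : i < walls.length), ((walls[i]'hi).1 ≤ key ↔ i < c)) :
    ∀ (n left right : Nat), right - left ≤ n → left ≤ c → c ≤ right → right ≤ walls.length →
      pvFFGTgo walls key left right = c := by
  intro n
  induction n with
  | zero =>
    intro l r hf h1 h2 h3
    unfold pvFFGTgo
    rw [dif_neg (by omega)]
    omega
  | succ n ih =>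
    intro l r hf h1 h2 h3
    unfold pvFFGTgo
    by_cases hlr : l < r
    · rw [dif_pos hlr]
      have hm1 : l ≤ (l + r) / 2 := by omega
      have hm2 : (l + r) / 2 < r := by omega
      have hmlen : (l + r) / 2 < walls.length := by omega
      rw [List.getElem?_eq_getElem hmlen]
      simp only
      by_cases hk : (walls[(l + r) / 2]'hmlen).1 ≤ key
      · rw [if_pos hk]
        have := (hchar _ hmlen).mp hk
        exact ih _ _ (by omega) (by omega) h2 h3
      · rw [if_neg hk]
        have : ¬ ((l + r) / 2 < c) := fun hlt => hk ((hchar _ hmlen).mpr hlt)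
        exact ih _ _ (by omega) h1 (by omega) (by omega)
    · rw [dif_neg hlr]; omega

theorem pvGoGE_eq (walls : List (Int × (Int × Int))) (key : Int)
    (c : Nat)
    (hchar : ∀ (i : Nat) (hi : i < walls.length), ((walls[i]'hi).1 < key ↔ i < c)) :
    ∀ (n left right : Nat), right - left ≤ n → left ≤ c → c ≤ right → right ≤ walls.length →
      pvFFGEgo walls key left right = c := by
  intro n
  induction n with
  | zero =>
    intro l r hf h1 h2 h3
    unfold pvFFGEgo
    rw [dif_neg (by omega)]
    omega
  | succ n ih =>
    intro l r hf h1 h2 h3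
    unfold pvFFGEgo
    by_cases hlr : l < r
    · rw [dif_pos hlr]
      have hm1 : l ≤ (l + r) / 2 := by omega
      have hm2 : (l + r) / 2 < r := by omega
      have hmlen : (l + r) / 2 < walls.length := by omega
      rw [List.getElem?_eq_getElem hmlen]
      simp only
      by_cases hk : (walls[(l + r) / 2]'hmlen).1 < key
      · rw [if_pos hk]
        have := (hchar _ hmlen).mp hk
        exact ih _ _ (by omega) (by omega) h2 h3
      · rw [if_neg hk]
        have : ¬ ((l + r) / 2 < c) := fun hlt => hk ((hchar _ hmlen).mpr hlt)
        exact ih _ _ (by omega) h1 (by omega) (by omega)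
    · rw [dif_neg hlr]; omega


theorem pvFFGT_eq (walls : List (Int × (Int × Int))) (key : Int)
    (hs : List.Pairwise (fun a b => a.1 ≤ b.1) walls) :
    find_first_greater_than walls key
      = (walls.takeWhile (fun w => decide (w.1 ≤ key))).length := by
  have hle : (walls.takeWhile (fun w => decide (w.1 ≤ key))).length ≤ walls.length :=
    (List.takeWhile_sublist _).length_le
  exact pvGoGT_eq walls key _ (pvCharGT walls key hs) walls.length 0 walls.length
    (by omega) (by omega) hle le_rfl

theorem pvFFGE_eq (walls : List (Int × (Int × Int))) (key : Int)
    (hs : List.Pairwise (fun a b => a.1 ≤ b.1) walls) :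
    find_first_greater_or_equal walls key
      = (walls.takeWhile (fun w => decide (w.1 < key))).length := by
  have hle : (walls.takeWhile (fun w => decide (w.1 < key))).length ≤ walls.length :=
    (List.takeWhile_sublist _).length_le
  exact pvGoGE_eq walls key _ (pvCharGE walls key hs) walls.length 0 walls.length
    (by omega) (by omega) hle le_rfl

-- sorted: dropWhile p = filter (!p) when p downward closed wrt order (p a fails → fails for all later)
theorem pvDropWhile_eq_filter (pmin : Int) (l : List (Int × (Int × Int)))
    (hs : List.Pairwise (fun a b => a.1 ≤ b.1) l) :
    l.dropWhile (fun w => decide (w.1 ≤ pmin)) = l.filter (fun w => decide (pmin < w.1)) := by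
  induction l with
  | nil => simp
  | cons a t ih =>
    rcases List.pairwise_cons.mp hs with ⟨ha, ht⟩
    by_cases h : a.1 ≤ pmin
    · simp [h, not_lt.mpr h, ih ht]
    · rw [List.dropWhile_cons_of_neg (by simpa using h)]
      rw [List.filter_cons_of_pos (by simpa using not_le.mp h)]
      rw [List.filter_eq_self.mpr]
      intro b hb
      have := ha b hb
      simp; omega
theorem pvTakeWhile_eq_filter (pmax : Int) (l : List (Int × (Int × Int)))
    (hs : List.Pairwise (fun a b => a.1 ≤ b.1) l) :
    l.takeWhile (fun w => decide (w.1 < pmax)) = l.filter (fun w => decide (w.1 < pmax)) := by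
  induction l with
  | nil => simp
  | cons a t ih =>
    rcases List.pairwise_cons.mp hs with ⟨ha, ht⟩
    by_cases h : a.1 < pmax
    · simp [h, ih ht]
    · rw [List.takeWhile_cons_of_neg (by simpa using h)]
      rw [List.filter_cons_of_neg (by simpa using h)]
      rw [List.filter_eq_nil_iff.mpr]
      intro b hb
      have := ha b hb
      simp; omega
theorem pvTakeWhile_imp {α : Type} (p q : α → Bool) (l : List α) (h : ∀ a, p a = true → q a = true) :
    l.takeWhile (fun a => q a && p a) = l.takeWhile p := by
  induction l with
  | nil => simp
  | cons a t ih =>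
    by_cases hp : p a
    · simp [hp, h a hp, ih]
    · simp [hp]

theorem pvTWTW {α : Type} (p q : α → Bool) (l : List α) :
    (l.takeWhile q).takeWhile p = l.takeWhile (fun a => q a && p a) := by
  induction l with
  | nil => simp
  | cons a t ih =>
    by_cases hq : q a <;> by_cases hp : p a <;> simp [hq, hp, ih]

theorem pvDropLenTW {α : Type} (p : α → Bool) (l : List α) :
    l.drop (l.takeWhile p).length = l.dropWhile p := by
  have h : l.takeWhile p ++ l.dropWhile p = l := List.takeWhile_append_dropWhile
  calc l.drop (l.takeWhile p).length
      = (l.takeWhile p ++ l.dropWhile p).drop (l.takeWhile p).length := by rw [h]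
    _ = l.dropWhile p := List.drop_left

theorem pvSliceMain (walls : List (Int × (Int × Int))) (pmin pmax : Int)
    (hs : List.Pairwise (fun a b => a.1 ≤ b.1) walls) :
    (walls.drop (walls.takeWhile (fun w => decide (w.1 ≤ pmin))).length).take
        ((walls.takeWhile (fun w => decide (w.1 < pmax))).length
          - (walls.takeWhile (fun w => decide (w.1 ≤ pmin))).length)
      = walls.filter (fun w => decide (pmin < w.1) && decide (w.1 < pmax)) := by
  set p : Int × (Int × Int) → Bool := fun w => decide (w.1 ≤ pmin) with hpdef
  set q : Int × (Int × Int) → Bool := fun w => decide (w.1 < pmax) with hqdef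
  by_cases hcase : pmin < pmax
  · have himp : ∀ a, p a = true → q a = true := by
      intro a ha; simp [hpdef, hqdef] at ha ⊢; omega
    have hpw : (walls.takeWhile q).takeWhile p = walls.takeWhile p := by
      rw [pvTWTW, pvTakeWhile_imp p q walls himp]
    have hsq : List.Pairwise (fun a b => a.1 ≤ b.1) (walls.takeWhile q) :=
      hs.sublist (List.takeWhile_sublist q)
    calc (walls.drop (walls.takeWhile p).length).take
            ((walls.takeWhile q).length - (walls.takeWhile p).length)
        = (walls.take (walls.takeWhile q).length).drop (walls.takeWhile p).length := by
          rw [← List.extract_eq_drop_take']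
      _ = (walls.takeWhile q).drop (walls.takeWhile p).length :=  by
          rw [(List.prefix_iff_eq_take.mp (List.takeWhile_prefix q)).symm]
      _ = (walls.takeWhile q).drop ((walls.takeWhile q).takeWhile p).length := by rw [hpw]
      _ = (walls.takeWhile q).dropWhile p := pvDropLenTW p _
      _ = (walls.takeWhile q).filter (fun w => decide (pmin < w.1)) :=
          pvDropWhile_eq_filter pmin _ hsq
      _ = (walls.filter q).filter (fun w => decide (pmin < w.1)) := by
          rw [pvTakeWhile_eq_filter pmax walls hs]
      _ = walls.filter (fun w => decide (pmin < w.1) && q w) := by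
          rw [List.filter_filter]
      _ = walls.filter (fun w => decide (pmin < w.1) && decide (w.1 < pmax)) := rfl
  · have himp : ∀ a, q a = true → p a = true := by
      intro a ha; simp [hpdef, hqdef] at ha ⊢; omega
    have hle : (walls.takeWhile q).length ≤ (walls.takeWhile p).length := by
      calc (walls.takeWhile q).length
          = ((walls.takeWhile p).takeWhile q).length := by
            rw [pvTWTW, pvTakeWhile_imp q p walls himp]
        _ ≤ (walls.takeWhile p).length := (List.takeWhile_sublist q).length_le
    rw [Nat.sub_eq_zero_of_le hle]
    simp only [List.take_zero]
    symm
    rw [List.filter_eq_nil_iff]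
    intro a _
    simp [hqdef]
    omega


def pvG : Nat × Option Int × Bool → Int → Nat × Option Int × Bool :=
  fun st x => ((st.1 + 1) % 2, some x,
    st.2.2 && !(match st.2.1 with | none => false | some q => decide (x - q > 1)))

theorem pvG_parity (cs : List Int) : ∀ st : Nat × Option Int × Bool, st.1 ≤ 1 →
    (cs.foldl pvG st).1 = (st.1 + cs.length) % 2 := by
  induction cs with
  | nil => intro st h; simp; omega
  | cons a t ih =>
    intro st h
    rw [List.foldl_cons, ih _ (by simp [pvG]; omega)]
    simp [pvG]
    omega

theorem pvG_ok (cs : List Int) : ∀ st : Nat × Option Int × Bool,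
    (cs.foldl pvG st).2.2 = (st.2.2 &&
      (match st.2.1 with | none => pvGapCheck cs | some q => pvGapCheck (q :: cs))) := by
  induction cs with
  | nil => intro st; cases st.2.1 <;> simp [pvGapCheck]
  | cons a t ih =>
    intro st
    simp only [List.foldl_cons, ih, pvG]
    cases hq : st.2.1 with
    | none => simp [Bool.and_assoc]
    | some q =>
      simp only
      by_cases h : a - q > 1
      · simp [pvGapCheck, h]
      · simp [pvGapCheck, h]

theorem pvFinal (cs : List Int) :
    (if cs.length % 2 == 1 then false else if decide (cs.length > 0) then pvGapCheck cs else true)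
      = (((cs.foldl pvG ((0 : Nat), (none : Option Int), true)).1 == 0)
          && (cs.foldl pvG ((0 : Nat), (none : Option Int), true)).2.2) := by
  rw [pvG_parity _ _ (by simp), pvG_ok]
  simp only [Nat.zero_add, Bool.true_and]
  by_cases hodd : cs.length % 2 = 1
  · simp [hodd]
  · have h0 : cs.length % 2 = 0 := by omega
    simp only [h0]
    by_cases hlen : cs.length > 0
    · simp [hlen]
    · have : cs = [] := by
        cases cs with | nil => rfl | cons a t => simp at hlen
      simp [this, pvGapCheck]

-- ===== VERDICT (by name: the statement is the Claim_ definition above) =====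
theorem check_walls_crossed_spec : Claim_equal_check_walls_crossed := by
  intro walls pmin pmax smin smax _hdom hpre
  unfold Spec_check_walls_crossed
  rcases hpre with hs | hno
  case inr =>
    -- no wall overlaps the secondary window: both sides keep no cross and return true
    simp only [check_walls_crossed, check_walls_crossed_alt]
    rw [PySem.List.foldl_append_if, PySem.List.foldl_if_eq_foldl_filter]
    rw [List.filter_eq_nil_iff.mpr (by
      intro w hw
      rcases hno w (PySem.List.mem_of_mem_slice _ _ _ hw) with h | h <;> simp <;> omega)]
    rw [List.filter_eq_nil_iff.mpr (by
      intro w hw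
      rcases hno w hw with h | h <;> simp <;> omega)]
    simp
  simp only [check_walls_crossed, check_walls_crossed_alt]
  rw [pvFFGT_eq walls pmin hs, pvFFGE_eq walls pmax hs]
  rw [PySem.List.slice_natCast, pvSliceMain walls pmin pmax hs]
  rw [PySem.List.foldl_append_if]
  rw [PySem.List.foldl_if_eq_foldl_filter]
  simp only [List.nil_append]
  rw [List.filter_filter]
  have hfc : (walls.filter (fun w => decide (pmin < w.1) && decide (w.1 < pmax) && decide (w.2.2 > smin) && decide (w.2.1 < smax)))
      = walls.filter (fun w => (!(decide (w.2.2 ≤ smin) || decide (w.2.1 ≥ smax))) && (decide (pmin < w.1) && decide (w.1 < pmax))) := by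
    apply List.filter_congr
    intro w _
    rw [Bool.eq_iff_iff]
    simp
    omega
  rw [hfc]
  rw [show (fun (st : Nat × Option Int × Bool) (w : Int × (Int × Int)) =>
        ((st.1 + 1) % 2, some w.1, st.2.2 && !(match st.2.1 with | none => false | some q => decide (w.1 - q > 1))))
      = (fun st w => pvG st w.1) from rfl]
  rw [← List.foldl_map]
  exact pvFinal _
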